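-- pv_equiv track=rewrite | github.com/de-koen/leetcode-solutions | 2231. Largest Number After Digit Swaps by Parity/largest_number.py | largest_number_after_permutation
-- ===== SOURCE A (Python) =====
-- def largest_number_after_permutation(num):
--     digits = list(map(int, str(num)))
--     odd = []
--     even = []
--
--     for digit in digits:
--         if(digit % 2 == 0):
--             even.append(digit)
--         else:
--             odd.append(digit)
--
--     odd.sort()
--     even.sort()
--     result = ""
--
--     for digit in digits:
--         if(digit % 2 == 0):
--             result += str(even.pop())
--         else:
--             result += str(odd.pop())
--
--     return int(result)
-- ===== SOURCE B (Python) =====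
-- def largest_number_after_permutation(num):
--     # Different strategy from the sort-and-pop original: pull the digits out
--     # arithmetically with divmod (least-significant first), tally them into a
--     # 10-bucket table, then walk the positions from the LEAST significant end,
--     # giving each position the SMALLEST remaining digit of its parity via two
--     # ascending bucket pointers, and assemble the string back-to-front.
--     if num == 0:
--         return 0
--     count = [0] * 10
--     digits = []          # least-significant first
--     n = num
--     while n > 0:
--         n, d = divmod(n, 10)
--         digits.append(d)
--         count[d] += 1
--     e, o = 0, 1          # ascending pointers: smallest remaining even / odd
--     result = ""
--     for d in digits:
--         if d % 2 == 0:
--             while count[e] == 0: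
--                 e += 2
--             result = str(e) + result
--             count[e] -= 1
--         else:
--             while count[o] == 0:
--                 o += 2
--             result = str(o) + result
--             count[o] -= 1
--     return int(result)
-- ===== Notes on version B (the rewrite author's own statement) =====
-- stated objective: alternative
-- what changed: B never looks at str(num) and never sorts: it extracts the digits arithmetically with divmod (least-significant first), tallies them in a 10-bucket table, then walks the positions from the least significant end assigning each the SMALLEST remaining same-parity digit via two ascending bucket pointers, assembling the result string back-to-front (A partitions str(num) into two lists, comparison-sorts them and pops the largest per position left-to-right).
import Mathlib
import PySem

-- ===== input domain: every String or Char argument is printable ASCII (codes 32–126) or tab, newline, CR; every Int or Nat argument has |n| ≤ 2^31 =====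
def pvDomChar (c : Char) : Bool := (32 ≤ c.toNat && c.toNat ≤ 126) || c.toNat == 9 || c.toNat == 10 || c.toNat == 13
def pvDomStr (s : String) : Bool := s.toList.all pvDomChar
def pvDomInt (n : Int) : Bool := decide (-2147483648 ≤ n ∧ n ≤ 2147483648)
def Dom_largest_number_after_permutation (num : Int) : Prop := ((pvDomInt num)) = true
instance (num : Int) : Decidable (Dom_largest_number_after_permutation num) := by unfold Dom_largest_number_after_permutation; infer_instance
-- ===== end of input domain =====

-- B extracts the digits with divmod instead of str(num), tallies them in a 10-bucket table and
-- assembles the answer least-significant-position first, giving each position the smallest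
-- remaining same-parity digit via two ascending bucket pointers (no sort, no partition lists).

-- ===== PORT A =====
-- int(c) for a single char; the .getD 0 default is unreachable under Pre_ (all chars of str(num) are digits)
def pvToInt (c : Char) : Int := (PySem.Int.ofStr? (String.ofList [c])).getD 0

-- body of A's first loop: append the digit to the even or odd bucket
def pvPartA (p : List Int × List Int) (digit : Int) : List Int × List Int :=
  if PySem.Int.mod digit 2 == 0 then (p.1, p.2 ++ [digit]) else (p.1 ++ [digit], p.2)

-- body of A's second loop: pop the largest remaining digit of the right parity, append its str
def pvStepA (st : List Int × List Int × String) (digit : Int) : List Int × List Int × String :=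
  if PySem.Int.mod digit 2 == 0 then
    match PySem.List.pop? st.2.1 with
    | some (x, ev') => (st.1, ev', st.2.2 ++ PySem.Int.toStr x)
    | none => st   -- even.pop() on [] raises IndexError in Python; unreachable (bucket sizes match)
  else
    match PySem.List.pop? st.1 with
    | some (x, od') => (od', st.2.1, st.2.2 ++ PySem.Int.toStr x)
    | none => st   -- likewise unreachable

def largest_number_after_permutation (num : Int) : Int :=
  let digits := (PySem.Int.toStr num).toList.map pvToInt
  let pr := digits.foldl pvPartA ([], [])
  let odd := PySem.List.sorted pr.1 (fun x => x)
  let even := PySem.List.sorted pr.2 (fun x => x)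
  let fin := digits.foldl pvStepA (odd, even, "")
  (PySem.Int.ofStr? fin.2.2).getD 0   -- int(result); succeeds under Pre_

-- ===== PORT B =====
-- count[d] += 1 ; the index is 0..9 here, so .toNat is exact
def pvBump (c : List Int) (d : Int) : List Int :=
  c.set d.toNat (c.getD d.toNat 0 + 1)

-- B's `while n > 0` loop: n, d = divmod(n, 10); digits.append(d); count[d] += 1
def pvExtract (n : Int) (digits : List Int) (count : List Int) : List Int × List Int :=
  if h : 0 < n then
    pvExtract (PySem.Int.floordiv n 10) (digits ++ [PySem.Int.mod n 10]) (pvBump count (PySem.Int.mod n 10))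
  else (digits, count)
termination_by n.toNat
decreasing_by
  have h1 : n * 1 ≤ n * 10 := Int.mul_le_mul_of_nonneg_left (by omega) (by omega)
  have h10 : PySem.Int.floordiv n 10 < n :=
    (PySem.Int.floordiv_lt_iff_lt_mul (by omega : (0:Int) < 10)).mpr (by omega)
  omega

-- the `while count[p] == 0: p += 2` pointer climb; the p < 10 guard makes it total (Python would
-- raise IndexError past bucket 9), unreachable under the loop invariant (a nonzero bucket ≥ p exists)
def pvAscend (cnt : List Int) (p : Nat) : Nat :=
  if _h : p < 10 then
    if cnt.getD p 0 == 0 then pvAscend cnt (p + 2) else p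
  else p
termination_by 10 - p

-- body of B's second loop, prepending str of the chosen digit
def pvStepB (st : List Int × Nat × Nat × String) (d : Int) : List Int × Nat × Nat × String :=
  if PySem.Int.mod d 2 == 0 then
    let e := pvAscend st.1 st.2.1
    (st.1.set e (st.1.getD e 0 - 1), e, st.2.2.1, PySem.Int.toStr (e : Int) ++ st.2.2.2)
  else
    let o := pvAscend st.1 st.2.2.1
    (st.1.set o (st.1.getD o 0 - 1), st.2.1, o, PySem.Int.toStr (o : Int) ++ st.2.2.2)

def largest_number_after_permutation_alt (num : Int) : Int :=
  if num == 0 then 0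
  else
    let p := pvExtract num [] [0,0,0,0,0,0,0,0,0,0]
    let fin := p.1.foldl pvStepB (p.2, 0, 1, "")
    (PySem.Int.ofStr? fin.2.2.2).getD 0

-- ===== PRECONDITION & SPEC =====
-- Pre_ excludes exactly the inputs where A raises: for num < 0, str(num) starts with '-' and
-- int('-') raises ValueError in A's first line (B raises too: its while loop never runs and int('') raises).
def Pre_largest_number_after_permutation (num : Int) : Prop := 0 ≤ num
instance (num : Int) : Decidable (Pre_largest_number_after_permutation num) := by
  unfold Pre_largest_number_after_permutation; infer_instance

def pvWitness_largest_number_after_permutation : Int := 1203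

def Spec_largest_number_after_permutation (num : Int) (out : Int) : Prop :=
  out = largest_number_after_permutation_alt num
instance (num : Int) (out : Int) : Decidable (Spec_largest_number_after_permutation num out) := by
  unfold Spec_largest_number_after_permutation; infer_instance

-- ===== CLAIM (what is proved, stated in full; the proofs are below) =====
def Claim_equal_largest_number_after_permutation : Prop :=
  ∀ (num : Int), Dom_largest_number_after_permutation num →
    Pre_largest_number_after_permutation num →
    Spec_largest_number_after_permutation num (largest_number_after_permutation num)

-- ===== LEMMAS AND PROOFS =====

-- Python's % (fmod) agrees with Lean's emod for the positive divisor 2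
lemma pvMod_two (d : Int) : PySem.Int.mod d 2 = d % 2 := by
  simp [PySem.Int.mod, Int.fmod_eq_emod_of_nonneg]

-- the parity predicate of both loops
def pvPe (d : Int) : Bool := PySem.Int.mod d 2 == 0

-- little-endian decimal digits of a Nat (the mathematical content of B's while loop)
def pvDN (n : Nat) : List Nat :=
  if h : 0 < n then n % 10 :: pvDN (n / 10) else []
decreasing_by omega

-- abstract form of A's second loop: positions left to right, largest remaining (pop from the back)
def pvGmax : List Int → List Int → List Int → List Int
  | [], _, _ => []
  | d :: l, od, ev =>
    if pvPe d then (ev.getLast?.getD 0) :: pvGmax l od ev.dropLast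
    else (od.getLast?.getD 0) :: pvGmax l od.dropLast ev

-- abstract form of B's second loop: positions right to left, smallest remaining (pop from the front)
def pvGmin : List Int → List Int → List Int → List Int
  | [], _, _ => []
  | d :: l, od, ev =>
    if pvPe d then ev.headD 0 :: pvGmin l od ev.tail
    else od.headD 0 :: pvGmin l od.tail ev

-- rendering a digit list as the concatenation of str(d)
def pvAsStr : List Int → String
  | [] => ""
  | d :: l => PySem.Int.toStr d ++ pvAsStr l

lemma asStr_append (a b : List Int) : pvAsStr (a ++ b) = pvAsStr a ++ pvAsStr b := by
  induction a with
  | nil => simp [pvAsStr]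
  | cons d a ih => simp [pvAsStr, ih]; rw [String.append_assoc]

lemma pvToInt_digitChar (d : Nat) (hd : d ≤ 9) : pvToInt (Nat.digitChar d) = (d : Int) := by
  interval_cases d <;> decide

-- Nat.toDigitsCore (the string side) versus the divmod digit list (the arithmetic side)
lemma toDigitsCore_eq_dN (f : Nat) : ∀ (n : Nat) (l : List Char), 0 < n → n ≤ f →
    Nat.toDigitsCore 10 f n l = ((pvDN n).map Nat.digitChar).reverse ++ l := by
  induction f with
  | zero => intro n l hn hf; omega
  | succ f ih =>
    intro n l hn hf
    rw [pvDN, dif_pos hn]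
    simp only [Nat.toDigitsCore]
    by_cases h0 : n / 10 = 0
    · rw [if_pos h0, pvDN, dif_neg (by omega)]
      simp
    · rw [if_neg h0, ih (n / 10) _ (by omega) (by omega)]
      simp

lemma dN_mem (n : Nat) : ∀ d ∈ pvDN n, d ≤ 9 := by
  induction n using Nat.strong_induction_on with
  | _ n ih =>
    rw [pvDN]
    by_cases hn : 0 < n
    · rw [dif_pos hn]
      intro d hd
      rcases List.mem_cons.mp hd with rfl | hd
      · omega
      · exact ih (n / 10) (by omega) d hd
    · rw [dif_neg hn]; intro d hd; simp at hd

-- A's str(num) digits are the reversed divmod digits, for num > 0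
lemma digitsA_eq (num : Int) (h : 0 < num) :
    (PySem.Int.toStr num).toList.map pvToInt = ((pvDN num.toNat).map (Nat.cast : Nat → Int)).reverse := by
  rw [PySem.Int.toList_toStr]
  have : PySem.Int.toChars num = Nat.toDigits 10 num.toNat := by
    simp [PySem.Int.toChars, not_lt.mpr (le_of_lt h)]
  rw [this, Nat.toDigits, toDigitsCore_eq_dN (num.toNat + 1) num.toNat [] (by omega) (by omega)]
  rw [List.append_nil, List.map_reverse]
  congr 1
  rw [List.map_map]
  apply List.map_congr_left
  intro d hd
  exact pvToInt_digitChar d (dN_mem _ _ hd) |>.trans (by simp)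

-- B's while loop computes the divmod digit list and its tally
lemma pvFloordiv_natCast (n : Nat) : PySem.Int.floordiv (n : Int) 10 = ((n / 10 : Nat) : Int) := by
  simp [PySem.Int.floordiv, Int.fdiv_eq_ediv]
lemma pvMod_natCast (n : Nat) : PySem.Int.mod (n : Int) 10 = ((n % 10 : Nat) : Int) := by
  simp [PySem.Int.mod, Int.fmod_eq_emod]

lemma extract_eq : ∀ (m : Nat) (n : Int), n.toNat = m → 0 ≤ n → ∀ (ds c : List Int),
    pvExtract n ds c =
      (ds ++ (pvDN n.toNat).map (Nat.cast : Nat → Int),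
       ((pvDN n.toNat).map (Nat.cast : Nat → Int)).foldl pvBump c) := by
  intro m
  induction m using Nat.strong_induction_on with
  | _ m ih =>
    intro n hm hn ds c
    rw [pvExtract]
    by_cases h : 0 < n
    · rw [dif_pos h]
      obtain ⟨N, rfl⟩ : ∃ N : Nat, n = (N : Int) := ⟨n.toNat, by omega⟩
      have hN : 0 < N := by exact_mod_cast h
      rw [pvFloordiv_natCast, pvMod_natCast]
      rw [ih (N / 10) (by simp at hm; omega) _ (Int.toNat_natCast (N / 10)) (by exact_mod_cast Nat.zero_le _)]
      rw [Int.toNat_natCast, Int.toNat_natCast]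
      conv_rhs => rw [pvDN, dif_pos hN]
      simp
    · rw [dif_neg h]
      have h0 : n.toNat = 0 := by omega
      rw [h0, pvDN, dif_neg (show ¬ 0 < 0 by omega)]
      simp

lemma getD_set_ne (c : List Int) (i k : Nat) (v : Int) (h : i ≠ k) :
    (c.set i v).getD k 0 = c.getD k 0 := by
  simp [List.getD, List.getElem?_set_ne h]
lemma getD_set_self (c : List Int) (k : Nat) (v : Int) (h : k < c.length) :
    (c.set k v).getD k 0 = v := by
  simp [List.getD, h]

lemma part_fold : ∀ (l a b : List Int),
    l.foldl pvPartA (a, b) =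
      (a ++ l.filter (fun d => !(PySem.Int.mod d 2 == 0)),
       b ++ l.filter (fun d => PySem.Int.mod d 2 == 0)) := by
  intro l
  induction l with
  | nil => simp
  | cons d l ih =>
    intro a b
    rw [List.foldl_cons]
    by_cases hd : (PySem.Int.mod d 2 == 0) = true
    · rw [pvPartA, if_pos hd, ih]
      simp only [List.filter_cons, hd]
      simp [List.append_assoc]
    · rw [pvPartA, if_neg hd, ih]
      rw [Bool.not_eq_true] at hd
      simp only [List.filter_cons, hd]
      simp [List.append_assoc]

lemma bump_fold : ∀ (l : List Int) (c : List Int), c.length = 10 →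
    (∀ d ∈ l, 0 ≤ d ∧ d ≤ 9) →
    (l.foldl pvBump c).length = 10 ∧
    (∀ k : Nat, k ≤ 9 → (l.foldl pvBump c).getD k 0 = c.getD k 0 + (l.count (k : Int) : Int)) := by
  intro l
  induction l with
  | nil => intro c hc _; simpa using hc
  | cons d l ih =>
    intro c hc hm
    have hd := hm d (by simp)
    have hlen : (pvBump c d).length = 10 := by simp [pvBump, hc]
    obtain ⟨ih1, ih2⟩ := ih (pvBump c d) hlen (fun x hx => hm x (by simp [hx]))
    refine ⟨ih1, fun k hk => ?_⟩
    rw [List.foldl_cons, ih2 k hk, List.count_cons]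
    by_cases hkd : d = (k : Int)
    · have : d.toNat = k := by omega
      rw [pvBump, this, getD_set_self c k _ (by omega)]
      simp [hkd]
      ring
    · have : d.toNat ≠ k := by omega
      rw [pvBump, getD_set_ne c _ k _ this]
      simp [hkd]

-- the ascending-pointer walk finds the head (minimum) of the remaining sorted parity class
lemma pvAscend_spec (r : Int) : ∀ (m p : Nat), 10 - p = m → ∀ (cnt od t : List Int) (y : Int),
    (∀ x ∈ od, x % 2 ≠ r) →
    (∀ x ∈ y :: t, 0 ≤ x ∧ x ≤ 9 ∧ x % 2 = r ∧ (p : Int) ≤ x) →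
    (∀ x ∈ t, y ≤ x) →
    ((p : Int) % 2 = r) →
    (∀ k : Nat, k ≤ 9 → cnt.getD k 0 = ((od.count (k : Int) + (y :: t).count (k : Int) : Nat) : Int)) →
    ((pvAscend cnt p : Nat) : Int) = y := by
  intro m
  induction m using Nat.strong_induction_on with
  | _ m ih =>
    intro p hm cnt od t y hod hmem hmin hpar hcnt
    have hy := hmem y (by simp)
    have hp10 : p < 10 := by omega
    rw [pvAscend, dif_pos hp10]
    by_cases h0 : cnt.getD p 0 = 0
    · -- bucket empty: p not in y :: t; all its elements are ≥ p + 2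
      have hnot : ((p : Nat) : Int) ∉ y :: t := by
        intro hin
        have := hcnt p (by omega)
        rw [h0] at this
        have hcod : od.count ((p : Nat) : Int) = 0 := by
          rw [List.count_eq_zero]
          intro hino
          exact hod _ hino (by push_cast at hpar ⊢; omega)
        have hc := List.count_pos_iff.mpr hin
        omega
      rw [if_pos (by simpa using h0)]
      refine ih (10 - (p + 2)) (by omega) (p + 2) rfl cnt od t y hod ?_ hmin ?_ hcnt
      · intro x hx
        have hb := hmem x hx
        have hne : x ≠ ((p : Nat) : Int) := fun he => hnot (he ▸ hx)
        push_cast at hb hne ⊢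
        refine ⟨hb.1, hb.2.1, hb.2.2.1, ?_⟩
        have := hb.2.2.1
        push_cast at hpar
        omega
      · push_cast at hpar ⊢; omega
    · -- bucket nonzero: p occurs in y :: t, hence equals the minimum y
      rw [if_neg (by simpa using h0)]
      have := hcnt p (by omega)
      have hcod : od.count ((p : Nat) : Int) = 0 := by
        rw [List.count_eq_zero]
        intro hin
        exact hod _ hin (by push_cast at hpar ⊢; omega)
      have hctv : 0 < (y :: t).count ((p : Nat) : Int) := by omega
      have hin := List.count_pos_iff.mp hctv
      have hyp : y ≤ ((p : Nat) : Int) := by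
        rcases List.mem_cons.mp hin with h | h
        · omega
        · exact hmin _ h
      have hpy : ((p : Nat) : Int) ≤ y := hy.2.2.2
      omega

-- gmin over an appended list proceeds in two stages, dropping the consumed prefixes
lemma gmin_append : ∀ (l₁ l₂ od ev : List Int),
    pvGmin (l₁ ++ l₂) od ev =
      pvGmin l₁ od ev ++ pvGmin l₂ (od.drop (l₁.countP (fun d => !pvPe d))) (ev.drop (l₁.countP pvPe)) := by
  intro l₁
  induction l₁ with
  | nil => simp [pvGmin]
  | cons d l₁ ih =>
    intro l₂ od ev
    simp only [List.cons_append, pvGmin, List.countP_cons]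
    by_cases hd : pvPe d = true
    · rw [if_pos hd, if_pos hd, ih]
      simp [hd, List.drop_drop, Nat.add_comm]
    · rw [if_neg hd, if_neg hd, ih]
      simp [hd, List.drop_drop, Nat.add_comm]

-- surplus elements at the back of the parity classes are never consumed
lemma gmin_surplus : ∀ (l od ev p q : List Int),
    l.countP (fun d => !pvPe d) ≤ od.length → l.countP pvPe ≤ ev.length →
    pvGmin l (od ++ p) (ev ++ q) = pvGmin l od ev := by
  intro l
  induction l with
  | nil => intro od ev p q _ _; simp [pvGmin]
  | cons d l ih =>
    intro od ev p q ho he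
    simp only [List.countP_cons] at ho he
    simp only [pvGmin]
    by_cases hd : pvPe d = true
    · rw [if_pos hd, if_pos hd]
      simp [hd] at ho he
      rcases ev with _ | ⟨y, ev⟩
      · simp at he
      · simp only [List.cons_append, List.headD_cons, List.tail_cons]
        rw [ih od ev p q (by omega) (by simp at he; omega)]
    · rw [if_neg hd, if_neg hd]
      simp [hd] at ho he
      rcases od with _ | ⟨y, od⟩
      · simp at ho
      · simp only [List.cons_append, List.headD_cons, List.tail_cons]
        rw [ih od ev p q (by simp at ho; omega) (by omega)]

-- THE reversal fact: smallest-remaining right-to-left is largest-remaining left-to-right, reversed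
lemma gmin_reverse_eq_gmax : ∀ (digits od ev : List Int),
    od.length = digits.countP (fun d => !pvPe d) → ev.length = digits.countP pvPe →
    (pvGmin digits.reverse od ev).reverse = pvGmax digits od ev := by
  intro digits
  induction digits with
  | nil => intro od ev _ _; simp [pvGmin, pvGmax]
  | cons d rest ih =>
    intro od ev ho he
    simp only [List.reverse_cons]
    rw [gmin_append, List.countP_reverse, List.countP_reverse]
    by_cases hd : pvPe d = true
    · have he' : ev.length = rest.countP pvPe + 1 := by rw [he]; simp [List.countP_cons, hd]
      have ho' : od.length = rest.countP (fun x => !pvPe x) := by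
        rw [ho]; simp [List.countP_cons, hd]
      rcases List.eq_nil_or_concat ev with rfl | ⟨ev₀, x, rfl⟩
      · simp at he'
      rw [List.concat_eq_append] at *
      have hev₀ : ev₀.length = rest.countP pvPe := by
        simp only [List.length_append, List.length_cons, List.length_nil] at he'; omega
      have hsur : pvGmin rest.reverse od (ev₀ ++ [x]) = pvGmin rest.reverse od ev₀ := by
        have := gmin_surplus rest.reverse od ev₀ [] [x] (by rw [List.countP_reverse]; omega)
          (by rw [List.countP_reverse]; omega)
        simpa using this
      have hdrop : (ev₀ ++ [x]).drop (rest.countP pvPe) = [x] := by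
        rw [← hev₀, List.drop_left]
      rw [hsur, hdrop]
      have hodrop : pvGmin [d] (od.drop (rest.countP (fun d => !pvPe d))) [x] = [x] := by
        simp [pvGmin, hd]
      rw [hodrop, List.reverse_append]
      simp only [List.reverse_cons, List.reverse_nil, List.nil_append]
      rw [ih od ev₀ ho' hev₀]
      simp [pvGmax, hd]
    · have hdf : pvPe d = false := by simpa using hd
      have ho' : od.length = rest.countP (fun x => !pvPe x) + 1 := by
        rw [ho]; simp [List.countP_cons, hdf]
      have he' : ev.length = rest.countP pvPe := by rw [he]; simp [List.countP_cons, hdf]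
      rcases List.eq_nil_or_concat od with rfl | ⟨od₀, x, rfl⟩
      · simp at ho'
      rw [List.concat_eq_append] at *
      have hod₀ : od₀.length = rest.countP (fun d => !pvPe d) := by
        simp only [List.length_append, List.length_cons, List.length_nil] at ho'; omega
      have hsur : pvGmin rest.reverse (od₀ ++ [x]) ev = pvGmin rest.reverse od₀ ev := by
        have := gmin_surplus rest.reverse od₀ ev [x] [] (by rw [List.countP_reverse]; omega)
          (by rw [List.countP_reverse]; omega)
        simpa using this
      have hdrop : (od₀ ++ [x]).drop (rest.countP (fun d => !pvPe d)) = [x] := by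
        rw [← hod₀, List.drop_left]
      rw [hsur, hdrop]
      have hodrop : pvGmin [d] [x] (ev.drop (rest.countP pvPe)) = [x] := by
        simp [pvGmin, hdf]
      rw [hodrop, List.reverse_append]
      simp only [List.reverse_cons, List.reverse_nil, List.nil_append]
      rw [ih od₀ ev hod₀ he']
      simp [pvGmax, hdf]

-- A's second loop renders pvGmax
lemma loopA_eq : ∀ (digits od ev : List Int) (res : String),
    od.length = digits.countP (fun d => !pvPe d) → ev.length = digits.countP pvPe →
    (digits.foldl pvStepA (od, ev, res)).2.2 = res ++ pvAsStr (pvGmax digits od ev) := by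
  intro digits
  induction digits with
  | nil => intro od ev res _ _; simp [pvGmax, pvAsStr]
  | cons d rest ih =>
    intro od ev res ho he
    rw [List.foldl_cons]
    by_cases hd : pvPe d = true
    · have he' : ev.length = rest.countP pvPe + 1 := by rw [he]; simp [List.countP_cons, hd]
      have ho' : od.length = rest.countP (fun x => !pvPe x) := by
        rw [ho]; simp [List.countP_cons, hd]
      have hdm : (PySem.Int.mod d 2 == 0) = true := hd
      rcases List.eq_nil_or_concat ev with rfl | ⟨t, y, rfl⟩
      · simp at he'
      rw [List.concat_eq_append] at *
      have hstep : pvStepA (od, t ++ [y], res) d = (od, t, res ++ PySem.Int.toStr y) := by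
        simp only [pvStepA, hdm, if_pos, PySem.List.pop?_last]
      rw [hstep, ih od t _ ho'
        (by simp only [List.length_append, List.length_cons, List.length_nil] at he'; omega)]
      have hgm : pvGmax (d :: rest) od (t ++ [y]) = y :: pvGmax rest od t := by
        simp [pvGmax, hd, List.dropLast_concat]
      rw [hgm]
      simp [pvAsStr, String.append_assoc]
    · have hdf : pvPe d = false := by simpa using hd
      have ho' : od.length = rest.countP (fun x => !pvPe x) + 1 := by
        rw [ho]; simp [List.countP_cons, hdf]
      have he' : ev.length = rest.countP pvPe := by rw [he]; simp [List.countP_cons, hdf]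
      have hdm : (PySem.Int.mod d 2 == 0) = false := hdf
      rcases List.eq_nil_or_concat od with rfl | ⟨t, y, rfl⟩
      · simp at ho'
      rw [List.concat_eq_append] at *
      have hstep : pvStepA (t ++ [y], ev, res) d = (t, ev, res ++ PySem.Int.toStr y) := by
        simp only [pvStepA, hdm, Bool.false_eq_true, PySem.List.pop?_last]
        simp
      rw [hstep, ih t ev _
        (by simp only [List.length_append, List.length_cons, List.length_nil] at ho'; omega)
        he']
      have hgm : pvGmax (d :: rest) (t ++ [y]) ev = y :: pvGmax rest t ev := by
        simp [pvGmax, hdf, List.dropLast_concat]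
      rw [hgm]
      simp [pvAsStr, String.append_assoc]

-- B's second loop renders pvGmin reversed (it prepends)
lemma loopB_eq : ∀ (l od ev cnt : List Int) (e o : Nat) (res : String),
    od.Pairwise (· ≤ ·) → ev.Pairwise (· ≤ ·) →
    (∀ x ∈ od, 0 ≤ x ∧ x ≤ 9 ∧ x % 2 = 1) →
    (∀ x ∈ ev, 0 ≤ x ∧ x ≤ 9 ∧ x % 2 = 0) →
    od.length = l.countP (fun d => !pvPe d) → ev.length = l.countP pvPe →
    cnt.length = 10 →
    (∀ k : Nat, k ≤ 9 → cnt.getD k 0 = ((od.count (k : Int) + ev.count (k : Int) : Nat) : Int)) →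
    (e : Int) % 2 = 0 → (∀ x ∈ ev, (e : Int) ≤ x) →
    (o : Int) % 2 = 1 → (∀ x ∈ od, (o : Int) ≤ x) →
    (l.foldl pvStepB (cnt, e, o, res)).2.2.2 = pvAsStr ((pvGmin l od ev).reverse) ++ res := by
  intro l
  induction l with
  | nil => intro od ev cnt e o res _ _ _ _ _ _ _ _ _ _ _ _; simp [pvGmin, pvAsStr]
  | cons d rest ih =>
    intro od ev cnt e o res hodS hevS hodM hevM ho he hcl hcnt hep hevB hop hodB
    rw [List.foldl_cons]
    by_cases hd : pvPe d = true
    · have he' : ev.length = rest.countP pvPe + 1 := by rw [he]; simp [List.countP_cons, hd]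
      have ho' : od.length = rest.countP (fun x => !pvPe x) := by
        rw [ho]; simp [List.countP_cons, hd]
      have hdm : (PySem.Int.mod d 2 == 0) = true := hd
      rcases ev with _ | ⟨y, t⟩
      · simp at he'
      have hdesc : ((pvAscend cnt e : Nat) : Int) = y := by
        refine pvAscend_spec 0 (10 - e) e rfl cnt od t y
          (fun x hx => by have := hodM x hx; omega)
          (fun x hx => by have := hevM x hx; exact ⟨this.1, this.2.1, this.2.2, hevB x hx⟩)
          (fun x hx => List.rel_of_pairwise_cons hevS hx) hep hcnt
      set e' := pvAscend cnt e with he''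
      have hstep : pvStepB (cnt, e, o, res) d =
          (cnt.set e' (cnt.getD e' 0 - 1), e', o, PySem.Int.toStr y ++ res) := by
        simp only [pvStepB, hdm, if_pos, ← he'', hdesc]
      rw [hstep]
      have hy9 : y ≤ 9 := (hevM y (by simp)).2.1
      have hcnt' : ∀ k : Nat, k ≤ 9 →
          (cnt.set e' (cnt.getD e' 0 - 1)).getD k 0 = ((od.count (k : Int) + t.count (k : Int) : Nat) : Int) := by
        intro k hk
        by_cases hke : e' = k
        · subst hke
          rw [getD_set_self _ _ _ (by omega), hcnt _ hk]
          have : (y :: t).count ((e' : Nat) : Int) = t.count ((e' : Nat) : Int) + 1 := by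
            simp [hdesc.symm, List.count_cons]
          push_cast [this]; ring
        · rw [getD_set_ne _ _ _ _ hke, hcnt _ hk]
          have hyk : y ≠ ((k : Nat) : Int) := by omega
          have : (y :: t).count ((k : Nat) : Int) = t.count ((k : Nat) : Int) := by
            simp [List.count_cons, hyk]
          rw [this]
      rw [ih od t _ e' o _ hodS (List.pairwise_cons.mp hevS).2 hodM
        (fun x hx => hevM x (by simp [hx]))
        ho' (by simp only [List.length_cons] at he'; omega)
        (by simp [hcl]) hcnt'
        (by rw [hdesc]; exact (hevM y (by simp)).2.2)
        (by intro x hx; rw [hdesc]; exact List.rel_of_pairwise_cons hevS hx)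
        hop hodB]
      have hgm : pvGmin (d :: rest) od (y :: t) = y :: pvGmin rest od t := by
        simp [pvGmin, hd]
      rw [hgm, List.reverse_cons, asStr_append]
      simp [pvAsStr, String.append_assoc]
    · have hdf : pvPe d = false := by simpa using hd
      have ho' : od.length = rest.countP (fun x => !pvPe x) + 1 := by
        rw [ho]; simp [List.countP_cons, hdf]
      have he' : ev.length = rest.countP pvPe := by rw [he]; simp [List.countP_cons, hdf]
      have hdm : (PySem.Int.mod d 2 == 0) = false := hdf
      rcases od with _ | ⟨y, t⟩
      · simp at ho'
      have hdesc : ((pvAscend cnt o : Nat) : Int) = y := by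
        refine pvAscend_spec 1 (10 - o) o rfl cnt ev t y
          (fun x hx => by have := hevM x hx; omega)
          (fun x hx => by have := hodM x hx; exact ⟨this.1, this.2.1, this.2.2, hodB x hx⟩)
          (fun x hx => List.rel_of_pairwise_cons hodS hx) hop
          (fun k hk => by rw [hcnt k hk]; push_cast; ring)
      set o' := pvAscend cnt o with ho''
      have hstep : pvStepB (cnt, e, o, res) d =
          (cnt.set o' (cnt.getD o' 0 - 1), e, o', PySem.Int.toStr y ++ res) := by
        simp only [pvStepB, hdm, Bool.false_eq_true, ← ho'', hdesc]
        simp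
      rw [hstep]
      have hy9 : y ≤ 9 := (hodM y (by simp)).2.1
      have hcnt' : ∀ k : Nat, k ≤ 9 →
          (cnt.set o' (cnt.getD o' 0 - 1)).getD k 0 = ((t.count (k : Int) + ev.count (k : Int) : Nat) : Int) := by
        intro k hk
        by_cases hko : o' = k
        · subst hko
          rw [getD_set_self _ _ _ (by omega), hcnt _ hk]
          have : (y :: t).count ((o' : Nat) : Int) = t.count ((o' : Nat) : Int) + 1 := by
            simp [hdesc.symm, List.count_cons]
          push_cast [this]; ring
        · rw [getD_set_ne _ _ _ _ hko, hcnt _ hk]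
          have hyk : y ≠ ((k : Nat) : Int) := by omega
          have : (y :: t).count ((k : Nat) : Int) = t.count ((k : Nat) : Int) := by
            simp [List.count_cons, hyk]
          rw [this]
      rw [ih t ev _ e o' _ (List.pairwise_cons.mp hodS).2 hevS
        (fun x hx => hodM x (by simp [hx])) hevM
        (by simp only [List.length_cons] at ho'; omega) he'
        (by simp [hcl]) hcnt'
        hep hevB
        (by rw [hdesc]; exact (hodM y (by simp)).2.2)
        (by intro x hx; rw [hdesc]; exact List.rel_of_pairwise_cons hodS hx)]
      have hgm : pvGmin (d :: rest) (y :: t) ev = y :: pvGmin rest t ev := by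
        simp [pvGmin, hdf]
      rw [hgm, List.reverse_cons, asStr_append]
      simp [pvAsStr, String.append_assoc]

-- ===== VERDICT (by name: the statement is the Claim_ definition above) =====
theorem largest_number_after_permutation_spec : Claim_equal_largest_number_after_permutation := by
  intro num _ hpre
  unfold Spec_largest_number_after_permutation
  unfold Pre_largest_number_after_permutation at hpre
  by_cases h0 : num = 0
  · subst h0; decide
  · have h : 0 < num := by omega
    simp only [largest_number_after_permutation, largest_number_after_permutation_alt]
    rw [if_neg (by simpa using h0)]
    set digits := (PySem.Int.toStr num).toList.map pvToInt with hdig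
    set lB := (pvDN num.toNat).map (Nat.cast : Nat → Int) with hlBdef
    have hlB : digits = lB.reverse := by
      rw [hdig, digitsA_eq num h]
    have hlBb : ∀ x ∈ lB, 0 ≤ x ∧ x ≤ 9 := by
      intro x hx
      rw [hlBdef] at hx
      obtain ⟨d, hd, rfl⟩ := List.mem_map.mp hx
      have := dN_mem _ _ hd
      omega
    have hb : ∀ x ∈ digits, 0 ≤ x ∧ x ≤ 9 := by
      intro x hx
      exact hlBb x (by rw [hlB] at hx; exact List.mem_reverse.mp hx)
    -- A's partition and sorts
    rw [part_fold]
    simp only [List.nil_append]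
    set odf := digits.filter (fun d => !(PySem.Int.mod d 2 == 0)) with hodf
    set evf := digits.filter (fun d => PySem.Int.mod d 2 == 0) with hevf
    set od0 := PySem.List.sorted odf (fun x => x) with hod0
    set ev0 := PySem.List.sorted evf (fun x => x) with hev0
    have hlo : od0.length = digits.countP (fun d => !pvPe d) := by
      rw [hod0, PySem.List.length_sorted, List.countP_eq_length_filter, hodf]; rfl
    have hle : ev0.length = digits.countP pvPe := by
      rw [hev0, PySem.List.length_sorted, List.countP_eq_length_filter, hevf]; rfl
    have hodM : ∀ x ∈ od0, 0 ≤ x ∧ x ≤ 9 ∧ x % 2 = 1 := by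
      intro x hx
      rw [hod0, PySem.List.mem_sorted, hodf] at hx
      have h1 := hb x (List.mem_of_mem_filter hx)
      have h2 := List.of_mem_filter hx
      simp only [pvMod_two, Bool.not_eq_true', beq_eq_false_iff_ne] at h2
      have := Int.emod_two_eq x
      exact ⟨h1.1, h1.2, by omega⟩
    have hevM : ∀ x ∈ ev0, 0 ≤ x ∧ x ≤ 9 ∧ x % 2 = 0 := by
      intro x hx
      rw [hev0, PySem.List.mem_sorted, hevf] at hx
      have h1 := hb x (List.mem_of_mem_filter hx)
      have h2 := List.of_mem_filter hx
      simp only [pvMod_two, beq_iff_eq] at h2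
      exact ⟨h1.1, h1.2, h2⟩
    -- A's second loop
    rw [loopA_eq digits od0 ev0 "" hlo hle]
    -- B's while loop (digits + tally)
    rw [extract_eq num.toNat num rfl (le_of_lt h) [] [0,0,0,0,0,0,0,0,0,0]]
    simp only [List.nil_append, ← hlBdef]
    obtain ⟨hcl, hcv⟩ := bump_fold lB [0,0,0,0,0,0,0,0,0,0] rfl hlBb
    set cnt0 := lB.foldl pvBump [0,0,0,0,0,0,0,0,0,0] with hcnt0
    have hcnt : ∀ k : Nat, k ≤ 9 →
        cnt0.getD k 0 = ((od0.count (k : Int) + ev0.count (k : Int) : Nat) : Int) := by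
      intro k hk
      rw [hcv k hk]
      have hcc : lB.count (k : Int) = digits.count (k : Int) := by
        rw [hlB, List.count_reverse]
      have hpo : od0.count (k : Int) = odf.count (k : Int) :=
        ((PySem.List.sorted_perm odf (fun x => x) false).count_eq _)
      have hpe : ev0.count (k : Int) = evf.count (k : Int) :=
        ((PySem.List.sorted_perm evf (fun x => x) false).count_eq _)
      have hz : [0,0,0,0,0,0,0,0,0,0].getD k (0:Int) = 0 := by
        interval_cases k <;> rfl
      rw [hcc, hpo, hpe, hz]
      rcases Int.emod_two_eq (k : Int) with hkp | hkp
      · have h1 : odf.count (k : Int) = 0 := by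
          rw [List.count_eq_zero]
          intro hin
          have h2 := List.of_mem_filter hin
          simp only [pvMod_two, Bool.not_eq_true', beq_eq_false_iff_ne] at h2
          exact h2 hkp
        have h2 : evf.count (k : Int) = digits.count (k : Int) := by
          rw [hevf]
          exact List.count_filter (by simp [pvMod_two, hkp])
        rw [h1, h2]; push_cast; ring
      · have h1 : evf.count (k : Int) = 0 := by
          rw [List.count_eq_zero]
          intro hin
          have h2 := List.of_mem_filter hin
          simp only [pvMod_two, beq_iff_eq] at h2
          omega
        have h2 : odf.count (k : Int) = digits.count (k : Int) := by
          rw [hodf]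
          refine List.count_filter ?_
          simp [pvMod_two, hkp]
        rw [h1, h2]; push_cast; ring
    -- B's second loop
    rw [loopB_eq lB od0 ev0 cnt0 0 1 ""
      (PySem.List.sorted_pairwise odf (fun x => x))
      (PySem.List.sorted_pairwise evf (fun x => x))
      hodM hevM
      (by rw [hlo, hlB, List.countP_reverse])
      (by rw [hle, hlB, List.countP_reverse])
      hcl hcnt
      (by decide)
      (fun x hx => by have := hevM x hx; push_cast; omega)
      (by decide)
      (fun x hx => by have := hodM x hx; push_cast; omega)]
    rw [hlB] at *
    have hfin := gmin_reverse_eq_gmax lB.reverse od0 ev0 (by rw [hlo]) (by rw [hle])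
    rw [List.reverse_reverse] at hfin
    rw [← hfin]
    simp
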